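-- pv_equiv track=rewrite | github.com/Baso1st/hackerrank-leetcode-practice | highest_value_palindrome.py | make_it_palindrome
-- ===== SOURCE A (Python) =====
-- def make_it_palindrome(s, allowed):
--     mid = len(s) // 2
--     i = 0
--     j = len(s) - 1
--     s_arr = list(s)
--     while i < mid and j >= mid:
--         if s_arr[i] != s_arr[j]:
--             s_arr[i] = s_arr[j] = max(s_arr[i], s_arr[j])
--             allowed -= 1
--         i += 1
--         j -= 1
--     return (''.join(s_arr), allowed)
-- ===== SOURCE B (Python) =====
-- def make_it_palindrome(s, allowed):
--     mid = len(s) // 2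
--     half = [max(s[i], s[len(s) - 1 - i]) for i in range(mid)]
--     changes = sum(1 for i in range(mid) if s[i] != s[len(s) - 1 - i])
--     middle = s[mid] if len(s) % 2 else ''
--     return (''.join(half) + middle + ''.join(reversed(half)), allowed - changes)
-- ===== Notes on version B (the rewrite author's own statement) =====
-- stated objective: alternative
-- what changed: B replaces A's in-place two-pointer mutation sweep by computing the corrected first half once (elementwise max with the mirrored character), counting mismatches, and rebuilding the whole string as half + optional middle + reversed half.
import Mathlib
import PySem

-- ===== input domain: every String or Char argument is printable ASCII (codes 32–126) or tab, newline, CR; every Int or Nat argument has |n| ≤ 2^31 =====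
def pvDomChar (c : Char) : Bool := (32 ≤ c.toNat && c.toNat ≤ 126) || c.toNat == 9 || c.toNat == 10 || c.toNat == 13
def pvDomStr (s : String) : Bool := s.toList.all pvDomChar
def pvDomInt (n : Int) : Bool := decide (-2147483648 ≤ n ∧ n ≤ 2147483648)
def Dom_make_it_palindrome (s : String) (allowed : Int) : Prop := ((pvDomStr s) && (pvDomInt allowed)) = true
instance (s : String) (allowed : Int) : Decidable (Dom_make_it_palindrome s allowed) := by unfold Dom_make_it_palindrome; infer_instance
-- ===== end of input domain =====

-- B rebuilds the palindrome from one corrected half (non-mutating) instead of A's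
-- in-place two-pointer sweep; objective: alternative decomposition, same cost.

-- ===== PORT A =====
-- A's while loop; every executed read is at an in-range index, so `getD`'s
-- default is never the value returned.
def pvLoopA (arr : List Char) (mid i j : Nat) (allowed : Int) : List Char × Int :=
  if h : i < mid ∧ mid ≤ j then
    if arr.getD i ' ' ≠ arr.getD j ' ' then
      let m := max (arr.getD i ' ') (arr.getD j ' ')
      pvLoopA ((arr.set i m).set j m) mid (i+1) (j-1) (allowed - 1)
    else
      pvLoopA arr mid (i+1) (j-1) allowed
  else (arr, allowed)
termination_by mid - i
decreasing_by all_goals omega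

def make_it_palindrome (s : String) (allowed : Int) : String × Int :=
  let arr := s.toList
  let r := pvLoopA arr (arr.length / 2) 0 (arr.length - 1) allowed
  (String.mk r.1, r.2)

-- ===== PORT B =====
def make_it_palindrome_alt (s : String) (allowed : Int) : String × Int :=
  let l := s.toList
  let n := l.length
  let mid := n / 2
  let half := (List.range mid).map (fun i => max (l.getD i ' ') (l.getD (n - 1 - i) ' '))
  let changes := (List.range mid).countP (fun i => l.getD i ' ' != l.getD (n - 1 - i) ' ')
  let middle := if n % 2 = 1 then [l.getD mid ' '] else []
  (String.mk (half ++ middle ++ half.reverse), allowed - (changes : Int))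

-- ===== PRECONDITION & SPEC =====
def Spec_make_it_palindrome (s : String) (allowed : Int) (out : String × Int) : Prop := out = make_it_palindrome_alt s allowed
instance (s : String) (allowed : Int) (out : String × Int) : Decidable (Spec_make_it_palindrome s allowed out) := by unfold Spec_make_it_palindrome; infer_instance

-- ===== CLAIM (what is proved, stated in full; the proofs are below) =====
def Claim_equal_make_it_palindrome : Prop := ∀ (s : String) (allowed : Int), Dom_make_it_palindrome s allowed → Spec_make_it_palindrome s allowed (make_it_palindrome s allowed)

-- ===== LEMMAS AND PROOFS =====

-- the array-rewriting part of A's loop, isolated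
def pvFix (arr : List Char) (mid n i : Nat) : List Char :=
  if i < mid then
    if arr.getD i ' ' ≠ arr.getD (n - 1 - i) ' ' then
      let m := max (arr.getD i ' ') (arr.getD (n - 1 - i) ' ')
      pvFix ((arr.set i m).set (n - 1 - i) m) mid n (i + 1)
    else pvFix arr mid n (i + 1)
  else arr
termination_by mid - i
decreasing_by all_goals omega

-- the counting part of A's loop, over the ORIGINAL array
def pvCnt (arr : List Char) (mid n i : Nat) : Nat :=
  if i < mid then
    (if arr.getD i ' ' ≠ arr.getD (n - 1 - i) ' ' then 1 else 0) + pvCnt arr mid n (i + 1)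
  else 0
termination_by mid - i
decreasing_by all_goals omega

theorem pv_getD_set (l : List Char) (a k : Nat) (x d : Char) :
    (l.set a x).getD k d = if a = k ∧ a < l.length then x else l.getD k d := by
  simp only [List.getD_eq_getElem?_getD, List.getElem?_set]
  split_ifs with h1 h2 h3 h4 <;> simp_all <;> omega

theorem pvFix_length_aux (mid n : Nat) : ∀ (d i : Nat) (arr : List Char), d = mid - i →
    (pvFix arr mid n i).length = arr.length := by
  intro d
  induction d with
  | zero => intro i arr hd; rw [pvFix, if_neg (by omega)]
  | succ d ih =>
    intro i arr hd
    rw [pvFix, if_pos (by omega)]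
    by_cases hne : arr.getD i ' ' ≠ arr.getD (n - 1 - i) ' '
    · rw [if_pos hne, ih (i + 1) _ (by omega)]; simp
    · rw [if_neg hne]; exact ih (i + 1) arr (by omega)

theorem pvFix_length (arr : List Char) (mid n i : Nat) :
    (pvFix arr mid n i).length = arr.length :=
  pvFix_length_aux mid n (mid - i) i arr rfl

theorem pvCnt_congr (arr arr2 : List Char) (mid n : Nat) : ∀ (i : Nat),
    (∀ t, i ≤ t → t < mid →
      arr.getD t ' ' = arr2.getD t ' ' ∧ arr.getD (n - 1 - t) ' ' = arr2.getD (n - 1 - t) ' ') →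
    pvCnt arr mid n i = pvCnt arr2 mid n i := by
  intro i
  induction i using pvCnt.induct (mid := mid) with
  | case1 i hlt ih =>
    intro h
    conv_lhs => rw [pvCnt, if_pos hlt]
    conv_rhs => rw [pvCnt, if_pos hlt]
    have h0 := h i le_rfl hlt
    rw [h0.1, h0.2, ih (fun t ht1 ht2 => h t (by omega) ht2)]
  | case2 i hge =>
    intro _
    conv_lhs => rw [pvCnt, if_neg hge]
    conv_rhs => rw [pvCnt, if_neg hge]

theorem pvCnt_eq (arr : List Char) (mid n : Nat) : ∀ (i : Nat),
    pvCnt arr mid n i =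
      (List.range' i (mid - i)).countP (fun t => arr.getD t ' ' != arr.getD (n - 1 - t) ' ') := by
  intro i
  induction i using pvCnt.induct (mid := mid) with
  | case1 i hlt ih =>
    rw [pvCnt, if_pos hlt]
    have hr : mid - i = (mid - (i + 1)) + 1 := by omega
    rw [hr, List.range'_succ, List.countP_cons, ih]
    simp only [bne_iff_ne, ne_eq, ite_not]
    exact Nat.add_comm _ _
  | case2 i hge =>
    rw [pvCnt, if_neg hge]
    have : mid - i = 0 := by omega
    simp [this]

theorem pvLoopA_eq (n mid : Nat) (hm : mid = n / 2) : ∀ (d i : Nat) (arr : List Char) (al : Int),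
    arr.length = n → i ≤ mid → d = mid - i →
    pvLoopA arr mid i (n - 1 - i) al = (pvFix arr mid n i, al - (pvCnt arr mid n i : Int)) := by
  intro d
  induction d with
  | zero =>
    intro i arr al hl hi hd
    have hge : ¬ i < mid := by omega
    rw [pvLoopA, dif_neg (by omega), pvFix, if_neg hge, pvCnt, if_neg hge]
    simp
  | succ d ih =>
    intro i arr al hl hi hd
    have hlt : i < mid := by omega
    have hj : mid ≤ n - 1 - i := by omega
    have hj1 : n - 1 - i - 1 = n - 1 - (i + 1) := by omega
    rw [pvLoopA, dif_pos ⟨hlt, hj⟩, pvFix, if_pos hlt, pvCnt, if_pos hlt]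
    by_cases hne : arr.getD i ' ' ≠ arr.getD (n - 1 - i) ' '
    · rw [if_pos hne, if_pos hne, if_pos hne]
      set m := max (arr.getD i ' ') (arr.getD (n - 1 - i) ' ') with hmdef
      set arr2 := (arr.set i m).set (n - 1 - i) m with harr2
      have hl2 : arr2.length = n := by simp [harr2, hl]
      have hcongr : pvCnt arr mid n (i + 1) = pvCnt arr2 mid n (i + 1) := by
        apply pvCnt_congr
        intro t ht1 ht2
        constructor
        · rw [harr2, pv_getD_set, pv_getD_set]
          rw [if_neg (by omega), if_neg (by omega)]
        · rw [harr2, pv_getD_set, pv_getD_set]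
          rw [if_neg (by omega), if_neg (by omega)]
      rw [hj1, ih (i + 1) arr2 (al - 1) hl2 (by omega) (by omega), hcongr]
      rw [Prod.mk.injEq]
      exact ⟨rfl, by push_cast; ring⟩
    · rw [if_neg hne, if_neg hne, if_neg hne]
      rw [hj1, ih (i + 1) arr al hl (by omega) (by omega)]
      rw [Prod.mk.injEq]
      exact ⟨rfl, by push_cast; ring⟩

theorem pvFix_getD (n mid : Nat) (hm : mid = n / 2) : ∀ (i : Nat) (arr : List Char) (k : Nat),
    arr.length = n → i ≤ mid → k < n →
    (pvFix arr mid n i).getD k ' ' =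
      if i ≤ k ∧ k < mid then max (arr.getD k ' ') (arr.getD (n - 1 - k) ' ')
      else if i ≤ n - 1 - k ∧ n - 1 - k < mid then max (arr.getD (n - 1 - k) ' ') (arr.getD k ' ')
      else arr.getD k ' ' := by
  intro i
  induction i using pvCnt.induct (mid := mid) with
  | case1 i hlt ih =>
    intro arr k hl hi hk
    have hj : mid ≤ n - 1 - i := by omega
    rw [pvFix, if_pos hlt]
    by_cases hne : arr.getD i ' ' ≠ arr.getD (n - 1 - i) ' '
    · rw [if_pos hne]
      set m := max (arr.getD i ' ') (arr.getD (n - 1 - i) ' ') with hmdef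
      set arr2 := (arr.set i m).set (n - 1 - i) m with harr2
      have hl2 : arr2.length = n := by simp [harr2, hl]
      rw [ih arr2 k hl2 (by omega) hk]
      have hgk : ∀ t, t ≠ i → t ≠ n - 1 - i → arr2.getD t ' ' = arr.getD t ' ' := by
        intro t h1 h2
        rw [harr2, pv_getD_set, pv_getD_set, if_neg (by simp [hl]; omega), if_neg (by omega)]
      have hgi : arr2.getD i ' ' = m := by
        rw [harr2, pv_getD_set, if_neg (by omega), pv_getD_set, if_pos ⟨rfl, by omega⟩]
      have hgj : arr2.getD (n - 1 - i) ' ' = m := by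
        rw [harr2, pv_getD_set, if_pos ⟨rfl, by simp [hl]; omega⟩]
      by_cases hki : k = i
      · subst hki
        rw [if_neg (by omega), if_neg (by omega), if_pos ⟨le_rfl, hlt⟩]
        exact hgi
      · by_cases hkj : k = n - 1 - i
        · have hmir : n - 1 - k = i := by omega
          rw [if_neg (by omega), if_neg (by omega), if_neg (by omega),
              if_pos (by rw [hmir]; exact ⟨le_rfl, hlt⟩), hmir]
          rw [hkj, hgj, hmdef]
        · have e1 : arr2.getD k ' ' = arr.getD k ' ' := hgk k hki hkj
          have e2 : arr2.getD (n - 1 - k) ' ' = arr.getD (n - 1 - k) ' ' := by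
            apply hgk <;> omega
          rw [e1, e2]
          by_cases c1 : i + 1 ≤ k ∧ k < mid
          · rw [if_pos c1, if_pos (by omega)]
          · rw [if_neg c1]
            by_cases c2 : i + 1 ≤ n - 1 - k ∧ n - 1 - k < mid
            · rw [if_pos c2, if_neg (by omega), if_pos (by omega)]
            · rw [if_neg c2, if_neg (by omega), if_neg (by omega)]
    · rw [if_neg hne]
      simp only [not_not] at hne
      rw [ih arr k hl (by omega) hk]
      by_cases hki : k = i
      · subst hki
        rw [if_neg (by omega), if_neg (by omega), if_pos ⟨le_rfl, hlt⟩, hne, max_self]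
      · by_cases hkj : k = n - 1 - i
        · have hmir : n - 1 - k = i := by omega
          rw [if_neg (by omega), if_neg (by omega), if_neg (by omega),
              if_pos (by rw [hmir]; exact ⟨le_rfl, hlt⟩), hmir, hkj, hne, max_self]
        · by_cases c1 : i + 1 ≤ k ∧ k < mid
          · rw [if_pos c1, if_pos (by omega)]
          · rw [if_neg c1]
            by_cases c2 : i + 1 ≤ n - 1 - k ∧ n - 1 - k < mid
            · rw [if_pos c2, if_neg (by omega), if_pos (by omega)]
            · rw [if_neg c2, if_neg (by omega), if_neg (by omega)]
  | case2 i hge =>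
    intro arr k hl hi hk
    rw [pvFix, if_neg hge, if_neg (by omega), if_neg (by omega)]

-- the rebuilt-from-half list equals A's rewritten array
theorem pvFix_eq_rebuild (l : List Char) (n mid : Nat) (hn : l.length = n) (hm : mid = n / 2) :
    pvFix l mid n 0 =
      ((List.range mid).map (fun i => max (l.getD i ' ') (l.getD (n - 1 - i) ' '))) ++
        (if n % 2 = 1 then [l.getD mid ' '] else []) ++
        ((List.range mid).map (fun i => max (l.getD i ' ') (l.getD (n - 1 - i) ' '))).reverse := by
  set half := (List.range mid).map (fun i => max (l.getD i ' ') (l.getD (n - 1 - i) ' ')) with hhalf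
  set middle := (if n % 2 = 1 then [l.getD mid ' '] else []) with hmiddef
  have hhl : half.length = mid := by simp [hhalf]
  have hml : middle.length = n % 2 := by
    rw [hmiddef]
    by_cases ho : n % 2 = 1
    · simp [ho]
    · simp [ho]; omega
  apply List.ext_getElem
  · rw [pvFix_length, hn, List.length_append, List.length_append, List.length_reverse, hhl, hml]
    omega
  · intro k hka hkb
    have hk1 : k < n := by rwa [pvFix_length, hn] at hka
    have hfix := pvFix_getD n mid hm 0 l k hn (by omega) hk1
    rw [← List.getD_eq_getElem _ ' ' hka, ← List.getD_eq_getElem _ ' ' hkb, hfix]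
    by_cases c1 : k < mid
    · rw [if_pos ⟨Nat.zero_le _, c1⟩,
          List.getD_append _ _ _ _ (by rw [List.length_append, hhl, hml]; omega),
          List.getD_append _ _ _ _ (by rw [hhl]; omega)]
      rw [List.getD_eq_getElem half ' ' (by rw [hhl]; omega)]
      simp only [hhalf, List.getElem_map, List.getElem_range]
    · rw [if_neg (by omega)]
      by_cases c2 : k < n - mid
      · -- the untouched middle position of an odd-length string: k = mid
        have hodd : n % 2 = 1 := by omega
        have hkm : k = mid := by omega
        rw [if_neg (by omega)]
        rw [List.getD_append _ _ _ _ (by rw [List.length_append, hhl, hml]; omega)]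
        rw [List.getD_append_right _ _ _ _ (by rw [hhl]; omega)]
        rw [hmiddef, if_pos hodd, hhl]
        have hkm : k = mid := by omega
        subst hkm
        simp
      · -- mirrored upper-half position
        have hc : n - 1 - k < mid := by omega
        rw [if_pos ⟨Nat.zero_le _, hc⟩]
        rw [List.getD_append_right _ _ _ _ (by rw [List.length_append, hhl, hml]; omega)]
        have hidx : k - (half ++ middle).length = k - (n - mid) := by
          rw [List.length_append, hhl, hml]; omega
        rw [hidx]
        have hlt : k - (n - mid) < half.length := by rw [hhl]; omega
        rw [List.getD_eq_getElem half.reverse ' ' (by rw [List.length_reverse]; exact hlt)]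
        rw [List.getElem_reverse]
        rw [← List.getD_eq_getElem half ' ' (by rw [hhl]; rw [hhl] at hlt; omega)]
        have hix2 : half.length - 1 - (k - (n - mid)) = n - 1 - k := by rw [hhl]; omega
        rw [hix2]
        rw [List.getD_eq_getElem half ' ' (by rw [hhl]; omega)]
        have hback : n - 1 - (n - 1 - k) = k := by omega
        simp only [hhalf, List.getElem_map, List.getElem_range, hback]

-- ===== VERDICT (by name: the statement is the Claim_ definition above) =====
theorem make_it_palindrome_spec : Claim_equal_make_it_palindrome := by
  intro s al _
  unfold Spec_make_it_palindrome
  simp only [make_it_palindrome, make_it_palindrome_alt]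
  have hL := pvLoopA_eq s.toList.length (s.toList.length / 2) rfl (s.toList.length / 2) 0
      s.toList al rfl (by omega) (by omega)
  simp only [Nat.sub_zero] at hL
  rw [hL]
  have hcnt : pvCnt s.toList (s.toList.length / 2) s.toList.length 0 =
      (List.range (s.toList.length / 2)).countP
        (fun t => s.toList.getD t ' ' != s.toList.getD (s.toList.length - 1 - t) ' ') := by
    rw [pvCnt_eq, Nat.sub_zero, ← List.range_eq_range']
  rw [pvFix_eq_rebuild s.toList s.toList.length (s.toList.length / 2) rfl rfl, hcnt]
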